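-- pv_equiv track=rewrite | github.com/ririanbo/thesis-Fingering-Estimation-Algorithm | fingering_algorithm.py | get_final_score
-- ===== SOURCE A (Python) =====
-- def get_final_score(po_score, route):
--     final_score = {}
--
--     for key, sheet in po_score.items():
--         new_key = key[:-4] + "_optimized.csv"
--         sound_num = 0
--         option_num = 0
--         final_score[new_key] = []
--         for itr, note in enumerate(sheet):
--             # 前の重音の続き
--             if sound_num == note[0]:
--                 if route[key][sound_num+1] == option_num:
--                     final_score[new_key].append(note)
--                 option_num += 1
--                 continue
--
--             #新しい重音
--             else:
--                 sound_num += 1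
--                 option_num = 0
--                 if route[key][sound_num+1] == option_num:
--                     final_score[new_key].append(note)
--                 option_num += 1
--
--     return final_score
-- ===== SOURCE B (Python) =====
-- def get_final_score(po_score, route):
--     final_score = {}
--     for key, sheet in po_score.items():
--         # pass 1: partition into runs driven by a running counter (not groupby!)
--         runs = []
--         g = 0
--         cur = []
--         for note in sheet:
--             if note[0] == g:
--                 cur.append(note)
--             else:
--                 if cur:
--                     runs.append((g, cur))
--                 g += 1
--                 cur = [note]
--         if cur:
--             runs.append((g, cur))
--         # pass 2: for each run pick the single routed note by direct indexing
--         picked = []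
--         for g, notes in runs:
--             idx = route[key][g + 1]
--             if 0 <= idx < len(notes):
--                 picked.append(notes[idx])
--         final_score[key[:-4] + "_optimized.csv"] = picked
--     return final_score
-- ===== Notes on version B (the rewrite author's own statement) =====
-- stated objective: alternative
-- what changed: Replaces A's single stateful per-note loop (running sound_num/option_num counters deciding each append inline) by a two-pass group-then-pick decomposition: first partition each sheet into runs driven by the running counter, then select each run's routed note by direct indexing with a bounds check.
import Mathlib
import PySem

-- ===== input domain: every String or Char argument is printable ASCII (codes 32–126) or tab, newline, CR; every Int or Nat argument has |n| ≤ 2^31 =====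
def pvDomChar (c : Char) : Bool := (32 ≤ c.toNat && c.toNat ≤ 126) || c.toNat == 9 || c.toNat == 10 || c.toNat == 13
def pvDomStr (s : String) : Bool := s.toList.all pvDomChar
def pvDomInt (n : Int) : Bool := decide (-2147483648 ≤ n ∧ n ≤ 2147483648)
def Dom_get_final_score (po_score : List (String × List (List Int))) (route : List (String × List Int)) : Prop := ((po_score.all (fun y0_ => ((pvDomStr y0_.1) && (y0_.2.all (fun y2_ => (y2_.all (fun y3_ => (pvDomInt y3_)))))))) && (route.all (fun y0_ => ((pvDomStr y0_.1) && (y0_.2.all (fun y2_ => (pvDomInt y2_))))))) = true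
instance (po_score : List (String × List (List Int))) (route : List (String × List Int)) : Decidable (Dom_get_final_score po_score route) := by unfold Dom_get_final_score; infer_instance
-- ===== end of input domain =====

-- B replaces A's single stateful per-note loop by a group-then-pick decomposition
-- (partition by the running counter, then index each group directly); objective: alternative.

-- ===== PORT A =====
-- A's inner loop body: state = (sound_num, option_num, collected notes)
def aInner (r : List Int) (st : Int × Int × List (List Int)) (note : List Int) :
    Int × Int × List (List Int) :=
  let n0 := (PySem.List.pyGet? note 0).getD 0
  if st.1 == n0 then
    (st.1, st.2.1 + 1,
      if (PySem.List.pyGet? r (st.1 + 1)).getD (-1) == st.2.1 then st.2.2 ++ [note] else st.2.2)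
  else
    ((st.1 + 1), 1,
      if (PySem.List.pyGet? r ((st.1 + 1) + 1)).getD (-1) == 0 then st.2.2 ++ [note] else st.2.2)

def get_final_score (po_score : List (String × List (List Int))) (route : List (String × List Int)) : List (String × List (List Int)) :=
  (po_score.foldl (fun (fs : PySem.Dict String (List (List Int))) kv =>
      let new_key := PySem.Str.slice kv.1 none (some (-4)) ++ "_optimized.csv"
      let r := ((PySem.Dict.mk route).get? kv.1).getD []
      let st := kv.2.foldl (aInner r) (0, 0, [])
      fs.insert new_key st.2.2)
    PySem.Dict.empty).items

-- ===== PORT B =====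
-- B pass 1 step: state = (g, current run, closed runs)
def bGroupStep (st : Int × List (List Int) × List (Int × List (List Int))) (note : List Int) :
    Int × List (List Int) × List (Int × List (List Int)) :=
  let n0 := (PySem.List.pyGet? note 0).getD 0
  if n0 == st.1 then (st.1, st.2.1 ++ [note], st.2.2)
  else (st.1 + 1, [note], st.2.2 ++ (if st.2.1 ≠ [] then [(st.1, st.2.1)] else []))

-- B pass 2 step: pick the routed note of one run by direct indexing
def bPickStep (r : List Int) (acc : List (List Int)) (gr : Int × List (List Int)) :
    List (List Int) :=
  let idx := (PySem.List.pyGet? r (gr.1 + 1)).getD (-1)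
  if 0 ≤ idx ∧ idx < (gr.2.length : Int) then acc ++ [(PySem.List.pyGet? gr.2 idx).getD []] else acc

def get_final_score_alt (po_score : List (String × List (List Int))) (route : List (String × List Int)) : List (String × List (List Int)) :=
  (po_score.foldl (fun (fs : PySem.Dict String (List (List Int))) kv =>
      let r := ((PySem.Dict.mk route).get? kv.1).getD []
      let st := kv.2.foldl bGroupStep (0, [], [])
      let runs := st.2.2 ++ (if st.2.1 ≠ [] then [(st.1, st.2.1)] else [])
      let picked := runs.foldl (bPickStep r) []
      fs.insert (PySem.Str.slice kv.1 none (some (-4)) ++ "_optimized.csv") picked)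
    PySem.Dict.empty).items

-- ===== PRECONDITION & SPEC =====
-- final value of A's running group counter over a sheet (largest route index accessed is this + 1)
def pvGroup (sheet : List (List Int)) : Int :=
  sheet.foldl (fun g note => if (PySem.List.pyGet? note 0).getD 0 == g then g else g + 1) 0

-- Pre_ excludes exactly the inputs where the Python raises: an empty note (IndexError on note[0]),
-- a key of a nonempty sheet missing from route (KeyError), or route[key] too short for the
-- accessed indices 2 .. pvGroup+1 (IndexError).
def Pre_get_final_score (po_score : List (String × List (List Int))) (route : List (String × List Int)) : Prop :=
  ∀ p ∈ po_score, (∀ note ∈ p.2, note ≠ ([] : List Int)) ∧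
    (p.2 ≠ [] → ((PySem.Dict.mk route).get? p.1).isSome = true ∧
      pvGroup p.2 + 2 ≤ (((((PySem.Dict.mk route).get? p.1).getD []).length : Int)))
instance (po_score : List (String × List (List Int))) (route : List (String × List Int)) : Decidable (Pre_get_final_score po_score route) := by unfold Pre_get_final_score; infer_instance

def pvWitness_get_final_score : (List (String × List (List Int))) × (List (String × List Int)) :=
  ([("ab.csv", [[0], [1]])], [("ab.csv", [9, 0, 0])])

def Spec_get_final_score (po_score : List (String × List (List Int))) (route : List (String × List Int)) (out : List (String × List (List Int))) : Prop := out = get_final_score_alt po_score route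
instance (po_score : List (String × List (List Int))) (route : List (String × List Int)) (out : List (String × List (List Int))) : Decidable (Spec_get_final_score po_score route out) := by unfold Spec_get_final_score; infer_instance

-- ===== CLAIM (what is proved, stated in full; the proofs are below) =====
def Claim_equal_get_final_score : Prop := ∀ (po_score : List (String × List (List Int))) (route : List (String × List Int)), Dom_get_final_score po_score route → Pre_get_final_score po_score route → Spec_get_final_score po_score route (get_final_score po_score route)

-- ===== LEMMAS AND PROOFS =====

-- what one run contributes
def pvPick (r : List Int) (g : Int) (notes : List (List Int)) : List (List Int) :=
  let idx := (PySem.List.pyGet? r (g + 1)).getD (-1)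
  if 0 ≤ idx ∧ idx < (notes.length : Int) then [(PySem.List.pyGet? notes idx).getD []] else []

theorem bPickStep_eq (r : List Int) (acc : List (List Int)) (gr : Int × List (List Int)) :
    bPickStep r acc gr = acc ++ pvPick r gr.1 gr.2 := by
  unfold bPickStep pvPick
  by_cases h : 0 ≤ (PySem.List.pyGet? r (gr.1 + 1)).getD (-1) ∧
      (PySem.List.pyGet? r (gr.1 + 1)).getD (-1) < (gr.2.length : Int) <;> simp [h]

theorem pickFold_eq (r : List Int) : ∀ (runs : List (Int × List (List Int))) (acc : List (List Int)),
    runs.foldl (bPickStep r) acc = acc ++ runs.flatMap (fun gr => pvPick r gr.1 gr.2) := by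
  intro runs
  induction runs with
  | nil => intro acc; simp
  | cons gr rest ih =>
      intro acc
      rw [List.foldl_cons, bPickStep_eq, ih]
      simp

theorem pvPick_nil (r : List Int) (g : Int) : pvPick r g [] = [] := by
  unfold pvPick; simp

theorem pvPick_append (r : List Int) (g : Int) (cur : List (List Int)) (note : List Int) :
    pvPick r g (cur ++ [note])
      = pvPick r g cur ++
        (if (PySem.List.pyGet? r (g + 1)).getD (-1) == (cur.length : Int) then [note] else []) := by
  unfold pvPick
  set idx := (PySem.List.pyGet? r (g + 1)).getD (-1) with hidx
  by_cases h1 : 0 ≤ idx ∧ idx < (cur.length : Int)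
  · have h2 : 0 ≤ idx ∧ idx < ((cur ++ [note]).length : Int) := by
      simp only [List.length_append, List.length_cons, List.length_nil]
      push_cast; omega
    have hne : (idx == (cur.length : Int)) = false := by
      simp only [beq_eq_false_iff_ne, ne_eq]; omega
    simp only [h1, h2, if_pos, hne, if_false, Bool.false_eq_true, List.append_nil]
    have hto : idx = ((idx.toNat : Nat) : Int) := by omega
    rw [hto, PySem.List.pyGet?_natCast, PySem.List.pyGet?_natCast,
        List.getElem?_append_left (by omega : idx.toNat < cur.length)]
  · by_cases h3 : idx = (cur.length : Int)
    · have h2 : 0 ≤ idx ∧ idx < ((cur ++ [note]).length : Int) := by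
        simp only [List.length_append, List.length_cons, List.length_nil]
        push_cast; omega
      have heq : (idx == (cur.length : Int)) = true := by simp [h3]
      simp only [h1, if_neg, not_false_iff, h2, if_pos, heq, if_true]
      have hto : idx = ((cur.length : Nat) : Int) := h3
      rw [hto, PySem.List.pyGet?_natCast]
      simp
    · have h2 : ¬ (0 ≤ idx ∧ idx < ((cur ++ [note]).length : Int)) := by
        simp only [List.length_append, List.length_cons, List.length_nil]
        push_cast; omega
      have hne : (idx == (cur.length : Int)) = false := by
        simp only [beq_eq_false_iff_ne, ne_eq]; exact h3
      simp [h1, h2, hne]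
      omega

-- flatten a B-state into its list of runs (closing the open run)
def pvFlush (st : Int × List (List Int) × List (Int × List (List Int))) :
    List (Int × List (List Int)) :=
  st.2.2 ++ (if st.2.1 ≠ [] then [(st.1, st.2.1)] else [])

-- the core invariant: A's loop from a mid-group state equals B's grouped picks
theorem loop_eq (r : List Int) : ∀ (sheet : List (List Int)) (g : Int) (cur : List (List Int))
    (runs : List (Int × List (List Int))),
    (sheet.foldl (aInner r)
        (g, (cur.length : Int), runs.flatMap (fun gr => pvPick r gr.1 gr.2) ++ pvPick r g cur)).2.2
    = (pvFlush (sheet.foldl bGroupStep (g, cur, runs))).flatMap (fun gr => pvPick r gr.1 gr.2) := by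
  intro sheet
  induction sheet with
  | nil =>
      intro g cur runs
      simp [pvFlush]
      by_cases hc : cur = []
      · simp [hc, pvPick_nil]
      · simp [hc]
  | cons note rest ih =>
      intro g cur runs
      simp only [List.foldl_cons]
      by_cases hn : g = (PySem.List.pyGet? note 0).getD 0
      · -- note continues the current run
        have ha : aInner r (g, (cur.length : Int), runs.flatMap (fun gr => pvPick r gr.1 gr.2) ++ pvPick r g cur) note
            = (g, ((cur ++ [note]).length : Int),
               runs.flatMap (fun gr => pvPick r gr.1 gr.2) ++ pvPick r g (cur ++ [note])) := by
          unfold aInner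
          simp only [← hn, beq_self_eq_true, if_true, Prod.mk.injEq]
          refine ⟨by trivial, by simp only [List.length_append, List.length_cons, List.length_nil]; push_cast; ring, ?_⟩
          rw [pvPick_append, ← List.append_assoc]
          split <;> simp
        have hb : bGroupStep (g, cur, runs) note = (g, cur ++ [note], runs) := by
          unfold bGroupStep
          simp [← hn]
        rw [ha, hb, ih]
      · -- note starts a new run
        have ha : aInner r (g, (cur.length : Int), runs.flatMap (fun gr => pvPick r gr.1 gr.2) ++ pvPick r g cur) note
            = (g + 1, (([note] : List (List Int)).length : Int),
               (runs ++ (if cur ≠ [] then [(g, cur)] else [])).flatMap (fun gr => pvPick r gr.1 gr.2)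
                 ++ pvPick r (g + 1) [note]) := by
          unfold aInner
          have hne : (g == (PySem.List.pyGet? note 0).getD 0) = false := by
            simp [hn]
          simp only [hne, Bool.false_eq_true, if_false, Prod.mk.injEq]
          refine ⟨by trivial, by simp, ?_⟩
          have hflat : (runs ++ (if cur ≠ [] then [(g, cur)] else [])).flatMap
              (fun gr => pvPick r gr.1 gr.2)
              = runs.flatMap (fun gr => pvPick r gr.1 gr.2) ++ pvPick r g cur := by
            by_cases hc : cur = []
            · simp [hc, pvPick_nil]
            · simp [hc]
          rw [hflat]
          have hp : pvPick r (g + 1) [note]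
              = if (PySem.List.pyGet? r (g + 1 + 1)).getD (-1) == 0 then [note] else [] := by
            unfold pvPick
            by_cases hz : (PySem.List.pyGet? r (g + 1 + 1)).getD (-1) = 0
            · have hc : 0 ≤ (PySem.List.pyGet? r (g + 1 + 1)).getD (-1) ∧
                  (PySem.List.pyGet? r (g + 1 + 1)).getD (-1) < (([note] : List (List Int)).length : Int) := by
                simp only [List.length_cons, List.length_nil]; omega
              simp only [hc, if_pos, hz]
              rw [show (0 : Int) = ((0 : Nat) : Int) by norm_num, PySem.List.pyGet?_natCast]
              simp
            · have hc : ¬ (0 ≤ (PySem.List.pyGet? r (g + 1 + 1)).getD (-1) ∧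
                  (PySem.List.pyGet? r (g + 1 + 1)).getD (-1) < (([note] : List (List Int)).length : Int)) := by
                simp only [List.length_cons, List.length_nil]
                push_cast
                omega
              simp [hz]
              omega
          rw [hp]
          split <;> simp
        have hb : bGroupStep (g, cur, runs) note
            = (g + 1, [note], runs ++ (if cur ≠ [] then [(g, cur)] else [])) := by
          unfold bGroupStep
          have hne : ((PySem.List.pyGet? note 0).getD 0 == g) = false := by
            simp; intro h; exact hn h.symm
          simp [hne]
        rw [ha, hb, ih]

-- per-key equality of the two inner computations
theorem inner_eq (r : List Int) (sheet : List (List Int)) :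
    (sheet.foldl (aInner r) (0, 0, [])).2.2
    = (pvFlush (sheet.foldl bGroupStep (0, [], []))).foldl (bPickStep r) [] := by
  rw [pickFold_eq]
  have := loop_eq r sheet 0 [] []
  simpa [pvPick_nil] using this

theorem outer_eq (route : List (String × List Int)) :
    ∀ (po : List (String × List (List Int))) (fs : PySem.Dict String (List (List Int))),
    po.foldl (fun (fs : PySem.Dict String (List (List Int))) kv =>
      let new_key := PySem.Str.slice kv.1 none (some (-4)) ++ "_optimized.csv"
      let r := ((PySem.Dict.mk route).get? kv.1).getD []
      let st := kv.2.foldl (aInner r) (0, 0, [])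
      fs.insert new_key st.2.2) fs
    = po.foldl (fun (fs : PySem.Dict String (List (List Int))) kv =>
      let r := ((PySem.Dict.mk route).get? kv.1).getD []
      let st := kv.2.foldl bGroupStep (0, [], [])
      let runs := st.2.2 ++ (if st.2.1 ≠ [] then [(st.1, st.2.1)] else [])
      let picked := runs.foldl (bPickStep r) []
      fs.insert (PySem.Str.slice kv.1 none (some (-4)) ++ "_optimized.csv") picked) fs := by
  intro po
  induction po with
  | nil => intro fs; rfl
  | cons kv rest ih =>
      intro fs
      simp only [List.foldl_cons]
      rw [inner_eq ((((PySem.Dict.mk route).get? kv.1).getD [])) kv.2]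
      exact ih _

-- ===== VERDICT (by name: the statement is the Claim_ definition above) =====
theorem get_final_score_spec : Claim_equal_get_final_score := by
  intro po_score route _ _
  unfold Spec_get_final_score get_final_score get_final_score_alt
  rw [outer_eq]
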